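-- pv_equiv track=rewrite | github.com/FaijulAmin/ttsky-NeuronCrunch | test/test.py | golden_4x4
-- ===== SOURCE A (Python) =====
-- def to_int8(v):
--     v = int(v) & 0xFF
--     return v - 256 if v >= 128 else v
--
-- def wrap20(v):
--     v = int(v) & 0xFFFFF
--     return v - 0x100000 if v >= 0x80000 else v
--
-- def golden_4x4(A, B, relu=False, C_prev=None, accum=False):
--     C = [[0]*4 for _ in range(4)]
--     for i in range(4):
--         for j in range(4):
--             acc = sum(to_int8(A[i][k]) * to_int8(B[k][j]) for k in range(4))
--             val = wrap20(acc)
--             if accum and C_prev is not None: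
--                 val = wrap20(C_prev[i][j] + val)
--             if relu and val < 0:
--                 val = 0
--             C[i][j] = val
--     return C
-- ===== SOURCE B (Python) =====
-- def to_int8(v):
--     v = int(v) & 0xFF
--     return v - 256 if v >= 128 else v
--
-- def wrap20(v):
--     v = int(v) & 0xFFFFF
--     return v - 0x100000 if v >= 0x80000 else v
--
-- def golden_4x4(A, B, relu=False, C_prev=None, accum=False):
--     # Rank-1 update (outer-product) matmul: k is the OUTER loop; each step adds
--     # outer(col_k(A), row_k(B)) into a whole 4x4 accumulator matrix.
--     acc = [[0] * 4 for _ in range(4)]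
--     for k in range(4):
--         col = [to_int8(A[i][k]) for i in range(4)]
--         row = [to_int8(B[k][j]) for j in range(4)]
--         for i in range(4):
--             for j in range(4):
--                 acc[i][j] += col[i] * row[j]
--     # Separate elementwise postprocessing pass: wrap, optional accumulate, relu.
--     out = []
--     for i in range(4):
--         r = []
--         for j in range(4):
--             val = wrap20(acc[i][j])
--             if accum and C_prev is not None:
--                 val = wrap20(C_prev[i][j] + val)
--             if relu and val < 0:
--                 val = 0
--             r.append(val)
--         out.append(r)
--     return out
-- ===== Notes on version B (the rewrite author's own statement) =====
-- stated objective: alternative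
-- what changed: B computes the product by rank-1 (outer-product) accumulation with k as the outermost loop, adding outer(col_k(A), row_k(B)) into a whole matrix accumulator, then applies wrap/accum/relu in a separate elementwise pass, instead of A's ijk loop nest with a fused scalar dot product per entry.
import Mathlib
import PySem

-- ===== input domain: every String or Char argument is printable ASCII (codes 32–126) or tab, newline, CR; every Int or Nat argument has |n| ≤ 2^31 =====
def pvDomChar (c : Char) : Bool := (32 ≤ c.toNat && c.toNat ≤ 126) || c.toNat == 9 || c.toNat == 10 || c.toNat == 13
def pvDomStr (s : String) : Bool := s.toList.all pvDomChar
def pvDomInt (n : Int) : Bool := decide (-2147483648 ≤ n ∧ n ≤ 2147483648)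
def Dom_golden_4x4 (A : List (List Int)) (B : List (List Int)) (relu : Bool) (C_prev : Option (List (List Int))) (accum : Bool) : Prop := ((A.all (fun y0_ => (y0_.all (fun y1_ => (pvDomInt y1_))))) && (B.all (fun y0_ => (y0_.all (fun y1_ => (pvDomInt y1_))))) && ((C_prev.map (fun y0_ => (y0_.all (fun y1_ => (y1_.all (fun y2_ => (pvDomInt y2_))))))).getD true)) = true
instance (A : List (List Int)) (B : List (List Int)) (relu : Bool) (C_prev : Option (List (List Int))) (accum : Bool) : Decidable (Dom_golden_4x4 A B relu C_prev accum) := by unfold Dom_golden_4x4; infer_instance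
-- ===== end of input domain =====

-- B replaces A's ijk loop nest with fused per-entry dot products by rank-1 (outer-product)
-- accumulation over k into a whole matrix accumulator, followed by a separate elementwise
-- wrap/accum/relu pass; return values are equal on Pre_.

-- ===== PORT A =====
-- shared helpers: both Python files define identical to_int8 / wrap20
def toInt8 (v : Int) : Int :=
  let w := PySem.Int.band v 255
  if 128 ≤ w then w - 256 else w

def wrap20i (v : Int) : Int :=
  let w := PySem.Int.band v 1048575
  if 524288 ≤ w then w - 1048576 else w

-- xs[i] for the indices Pre_ keeps in range (default never reached inside Pre_)
def gRow (M : List (List Int)) (i : Int) : List Int := (PySem.List.pyGet? M i).getD []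
def gEl (r : List Int) (i : Int) : Int := (PySem.List.pyGet? r i).getD 0

def golden_4x4 (A : List (List Int)) (B : List (List Int)) (relu : Bool) (C_prev : Option (List (List Int))) (accum : Bool) : List (List Int) :=
  let C0 := (PySem.List.pyRange 0 4 1).map (fun _ => List.replicate 4 (0 : Int))
  (PySem.List.pyRange 0 4 1).foldl (fun C i =>
    (PySem.List.pyRange 0 4 1).foldl (fun C j =>
      let acc := (PySem.List.pyRange 0 4 1).foldl
        (fun s k => s + toInt8 (gEl (gRow A i) k) * toInt8 (gEl (gRow B k) j)) 0
      let val := wrap20i acc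
      let val := if accum then
          (match C_prev with
           | some P => wrap20i (gEl (gRow P i) j + val)
           | none => val)
        else val
      let val := if relu && decide (val < 0) then 0 else val
      C.modify i.toNat (fun row => row.set j.toNat val)) C) C0

-- ===== PORT B =====
def golden_4x4_alt (A : List (List Int)) (B : List (List Int)) (relu : Bool) (C_prev : Option (List (List Int))) (accum : Bool) : List (List Int) :=
  -- phase 1: rank-1 updates, k outermost, whole-matrix accumulator
  let acc0 := (PySem.List.pyRange 0 4 1).map (fun _ => List.replicate 4 (0 : Int))
  let acc := (PySem.List.pyRange 0 4 1).foldl (fun acc k =>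
    let col := (PySem.List.pyRange 0 4 1).map (fun i => toInt8 (gEl (gRow A i) k))
    let row := (PySem.List.pyRange 0 4 1).map (fun j => toInt8 (gEl (gRow B k) j))
    (PySem.List.pyRange 0 4 1).foldl (fun acc i =>
      (PySem.List.pyRange 0 4 1).foldl (fun acc j =>
        acc.modify i.toNat (fun r => r.modify j.toNat
          (fun v => v + gEl col i * gEl row j))) acc) acc) acc0
  -- phase 2: elementwise postprocessing pass
  (PySem.List.pyRange 0 4 1).map (fun i =>
    (PySem.List.pyRange 0 4 1).map (fun j =>
      let val := wrap20i (gEl (gRow acc i) j)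
      let val := if accum then
          (match C_prev with
           | some P => wrap20i (gEl (gRow P i) j + val)
           | none => val)
        else val
      if relu && decide (val < 0) then (0 : Int) else val))

-- ===== PRECONDITION & SPEC =====
-- Pre_ excludes exactly the inputs where Python A raises IndexError: fewer than 4 rows
-- (or a row among the first 4 shorter than 4) in A, B, or — when accum is used — C_prev.
def Pre_golden_4x4 (A : List (List Int)) (B : List (List Int)) (relu : Bool) (C_prev : Option (List (List Int))) (accum : Bool) : Prop :=
  4 ≤ A.length ∧ (∀ r ∈ A.take 4, 4 ≤ r.length) ∧
  4 ≤ B.length ∧ (∀ r ∈ B.take 4, 4 ≤ r.length) ∧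
  (accum = true → ∀ P ∈ C_prev, 4 ≤ P.length ∧ ∀ r ∈ P.take 4, 4 ≤ r.length)
instance (A : List (List Int)) (B : List (List Int)) (relu : Bool) (C_prev : Option (List (List Int))) (accum : Bool) : Decidable (Pre_golden_4x4 A B relu C_prev accum) := by unfold Pre_golden_4x4; infer_instance

def pvWitness_golden_4x4 : List (List Int) × List (List Int) × Bool × Option (List (List Int)) × Bool :=
  ([[1,2,3,4],[5,6,7,8],[9,10,11,12],[13,14,15,16]],
   [[1,0,0,0],[0,1,0,0],[0,0,1,0],[0,0,0,1]], false, none, false)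

def Spec_golden_4x4 (A : List (List Int)) (B : List (List Int)) (relu : Bool) (C_prev : Option (List (List Int))) (accum : Bool) (out : List (List Int)) : Prop := out = golden_4x4_alt A B relu C_prev accum
instance (A : List (List Int)) (B : List (List Int)) (relu : Bool) (C_prev : Option (List (List Int))) (accum : Bool) (out : List (List Int)) : Decidable (Spec_golden_4x4 A B relu C_prev accum out) := by unfold Spec_golden_4x4; infer_instance

-- ===== CLAIM =====
def Claim_equal_golden_4x4 : Prop := ∀ (A : List (List Int)) (B : List (List Int)) (relu : Bool) (C_prev : Option (List (List Int))) (accum : Bool), Dom_golden_4x4 A B relu C_prev accum → Pre_golden_4x4 A B relu C_prev accum → Spec_golden_4x4 A B relu C_prev accum (golden_4x4 A B relu C_prev accum)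

-- ===== LEMMAS AND PROOFS =====
theorem len4_shape {α : Type} (l : List α) (h : 4 ≤ l.length) :
    ∃ a b c d t, l = a :: b :: c :: d :: t := by
  match l with
  | a :: b :: c :: d :: t => exact ⟨a, b, c, d, t, rfl⟩
  | [] | [_] | [_,_] | [_,_,_] => simp at h

-- ===== VERDICT =====
set_option maxHeartbeats 4000000 in
set_option maxRecDepth 20000 in
theorem golden_4x4_spec : Claim_equal_golden_4x4 := by
  intro A B relu C_prev accum _ hpre
  unfold Spec_golden_4x4
  obtain ⟨hA, hAr, hB, hBr, hP⟩ := hpre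
  obtain ⟨a0, a1, a2, a3, ta, rfl⟩ := len4_shape A hA
  obtain ⟨b0, b1, b2, b3, tb, rfl⟩ := len4_shape B hB
  simp only [List.take, List.mem_cons, forall_eq_or_imp] at hAr hBr
  obtain ⟨h0, h1, h2, h3, -⟩ := hAr
  obtain ⟨g0, g1, g2, g3, -⟩ := hBr
  obtain ⟨x0,x1,x2,x3,t0,rfl⟩ := len4_shape a0 h0
  obtain ⟨x4,x5,x6,x7,t1,rfl⟩ := len4_shape a1 h1
  obtain ⟨x8,x9,x10,x11,t2,rfl⟩ := len4_shape a2 h2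
  obtain ⟨x12,x13,x14,x15,t3,rfl⟩ := len4_shape a3 h3
  obtain ⟨y0,y1,y2,y3,s0,rfl⟩ := len4_shape b0 g0
  obtain ⟨y4,y5,y6,y7,s1,rfl⟩ := len4_shape b1 g1
  obtain ⟨y8,y9,y10,y11,s2,rfl⟩ := len4_shape b2 g2
  obtain ⟨y12,y13,y14,y15,s3,rfl⟩ := len4_shape b3 g3
  cases accum with
  | false =>
    cases C_prev <;> rfl
  | true =>
    cases C_prev with
    | none => rfl
    | some P =>
      obtain ⟨hPl, hPr⟩ := hP rfl P (by simp)
      obtain ⟨p0, p1, p2, p3, tp, rfl⟩ := len4_shape P hPl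
      simp only [List.take, List.mem_cons, forall_eq_or_imp] at hPr
      obtain ⟨q0, q1, q2, q3, -⟩ := hPr
      obtain ⟨z0,z1,z2,z3,u0,rfl⟩ := len4_shape p0 q0
      obtain ⟨z4,z5,z6,z7,u1,rfl⟩ := len4_shape p1 q1
      obtain ⟨z8,z9,z10,z11,u2,rfl⟩ := len4_shape p2 q2
      obtain ⟨z12,z13,z14,z15,u3,rfl⟩ := len4_shape p3 q3
      rfl
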